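-- pv_equiv track=rewrite | github.com/yc-labs/callie-caller | callie_caller/sip/audio_codec.py | linear_to_alaw
-- ===== SOURCE A (Python) =====
-- def linear_to_alaw(sample: int) -> int:
--     """Convert 16-bit linear PCM sample to A-law byte using ITU-T G.711 standard."""
--     # Scale down from full 16-bit range to A-law input range
--     # Since we scale up by 8 in decoding, scale down by 8 in encoding
--     sample = sample >> 3
--
--     # Clamp sample to valid A-law input range
--     if sample > 4095:
--         sample = 4095
--     elif sample < -4095:
--         sample = -4095
--
--     # Get sign and magnitude
--     sign = 0x80 if sample < 0 else 0x00
--     if sample < 0: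
--         sample = -sample
--
--     # Find exponent and mantissa according to ITU-T G.711
--     if sample < 16:
--         # Linear segment (exponent 0)
--         exponent = 0
--         mantissa = (sample >> 1) & 0x0F
--     else:
--         # Logarithmic segments (exponents 1-7)
--         exponent = 1
--         temp = sample >> 5  # Start with sample/32
--         while temp > 0 and exponent < 7:
--             temp >>= 1
--             exponent += 1
--
--         # Calculate mantissa for this exponent
--         mantissa = (sample >> (exponent + 1)) & 0x0F
--
--     # Combine components
--     alaw = sign | (exponent << 4) | mantissa
--
--     # XOR with 0x55 to invert even bits (A-law specification)
--     alaw ^= 0x55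
--
--     return alaw & 0xFF
-- ===== SOURCE B (Python) =====
-- def linear_to_alaw(sample: int) -> int:
--     """Convert 16-bit linear PCM sample to A-law byte (ITU-T G.711), closed-form exponent."""
--     s = max(-4095, min(4095, sample >> 3))
--     sign = 0x80 if s < 0 else 0x00
--     magnitude = -s if s < 0 else s
--     if magnitude < 16:
--         exponent = 0
--         mantissa = (magnitude >> 1) & 0x0F
--     else:
--         exponent = min(7, magnitude.bit_length() - 4)
--         mantissa = (magnitude >> (exponent + 1)) & 0x0F
--     return (sign | (exponent << 4) | mantissa) ^ 0x55
-- ===== Notes on version B (the rewrite author's own statement) =====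
-- stated objective: idiomatic
-- what changed: A's while-loop segment scan for the exponent is replaced by a closed-form exponent min(7, magnitude.bit_length() - 4), and the clamp is written with max/min; the final '& 0xFF' is dropped since the byte is already in range.
import Mathlib
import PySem

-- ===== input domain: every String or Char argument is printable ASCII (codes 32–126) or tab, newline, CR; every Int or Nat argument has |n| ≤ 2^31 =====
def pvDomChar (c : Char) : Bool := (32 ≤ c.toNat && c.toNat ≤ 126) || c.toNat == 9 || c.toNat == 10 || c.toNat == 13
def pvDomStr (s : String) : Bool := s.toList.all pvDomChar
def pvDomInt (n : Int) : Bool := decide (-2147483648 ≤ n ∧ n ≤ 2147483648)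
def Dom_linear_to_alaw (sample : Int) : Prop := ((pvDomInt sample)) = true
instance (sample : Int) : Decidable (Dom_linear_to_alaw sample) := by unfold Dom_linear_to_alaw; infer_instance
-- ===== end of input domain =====

-- B replaces A's iterative segment scan by a closed-form bit_length computation (idiomatic).
-- Python's '>>'/'<<' on ints are Lean's '>>>'/'<<<' with a Nat shift amount (all shift amounts here are literal or nonnegative).

-- ===== PORT A =====
-- the while loop 'while temp > 0 and exponent < 7: temp >>= 1; exponent += 1';
-- fuel 7 is enough: exponent starts at 1 and the loop stops at exponent = 7
def alawLoopA (temp exponent : Int) : Nat → Int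
  | 0 => exponent
  | f + 1 => if temp > 0 ∧ exponent < 7 then alawLoopA (temp >>> (1 : Nat)) (exponent + 1) f else exponent

def linear_to_alaw (sample : Int) : Int :=
  let sample := sample >>> (3 : Nat)
  let sample := if sample > 4095 then 4095 else if sample < -4095 then -4095 else sample
  let sign : Int := if sample < 0 then 0x80 else 0x00
  let sample := if sample < 0 then -sample else sample
  let em : Int × Int :=
    if sample < 16 then
      (0, PySem.Int.band (sample >>> (1 : Nat)) 0x0F)
    else
      let exponent := alawLoopA (sample >>> (5 : Nat)) 1 7
      -- exponent is nonnegative here, so '.toNat' of the Python shift amount is exact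
      (exponent, PySem.Int.band (sample >>> (exponent + 1).toNat) 0x0F)
  let alaw := PySem.Int.bor (PySem.Int.bor sign (em.1 <<< (4 : Nat))) em.2
  let alaw := PySem.Int.bxor alaw 0x55
  PySem.Int.band alaw 0xFF

-- ===== PORT B =====
def linear_to_alaw_alt (sample : Int) : Int :=
  let s := max (-4095) (min 4095 (sample >>> (3 : Nat)))
  let sign : Int := if s < 0 then 0x80 else 0x00
  let magnitude := if s < 0 then -s else s
  let em : Int × Int :=
    if magnitude < 16 then
      (0, PySem.Int.band (magnitude >>> (1 : Nat)) 0x0F)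
    else
      let exponent : Int := min 7 ((PySem.Int.bitLength magnitude : Int) - 4)
      (exponent, PySem.Int.band (magnitude >>> (exponent + 1).toNat) 0x0F)
  PySem.Int.bxor (PySem.Int.bor (PySem.Int.bor sign (em.1 <<< (4 : Nat))) em.2) 0x55

-- ===== PRECONDITION & SPEC =====
def Spec_linear_to_alaw (sample : Int) (out : Int) : Prop := out = linear_to_alaw_alt sample
instance (sample : Int) (out : Int) : Decidable (Spec_linear_to_alaw sample out) := by unfold Spec_linear_to_alaw; infer_instance

-- ===== CLAIM (what is proved, stated in full; the proofs are below) =====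
def Claim_equal_linear_to_alaw : Prop := ∀ (sample : Int), Dom_linear_to_alaw sample → Spec_linear_to_alaw sample (linear_to_alaw sample)

-- ===== LEMMAS AND PROOFS =====

-- the post-magnitude computation of each port, factored out for the proofs
def coreA (m sign : Int) : Int :=
  let em : Int × Int :=
    if m < 16 then (0, PySem.Int.band (m >>> (1 : Nat)) 0x0F)
    else
      let exponent := alawLoopA (m >>> (5 : Nat)) 1 7
      (exponent, PySem.Int.band (m >>> (exponent + 1).toNat) 0x0F)
  PySem.Int.band (PySem.Int.bxor (PySem.Int.bor (PySem.Int.bor sign (em.1 <<< (4 : Nat))) em.2) 0x55) 0xFF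

def coreB (m sign : Int) : Int :=
  let em : Int × Int :=
    if m < 16 then (0, PySem.Int.band (m >>> (1 : Nat)) 0x0F)
    else
      let exponent : Int := min 7 ((PySem.Int.bitLength m : Int) - 4)
      (exponent, PySem.Int.band (m >>> (exponent + 1).toNat) 0x0F)
  PySem.Int.bxor (PySem.Int.bor (PySem.Int.bor sign (em.1 <<< (4 : Nat))) em.2) 0x55

def magOf (sample : Int) : Int :=
  let s := max (-4095) (min 4095 (sample >>> (3 : Nat)))
  if s < 0 then -s else s

def signOf (sample : Int) : Int :=
  if max (-4095) (min 4095 (sample >>> (3 : Nat))) < 0 then 0x80 else 0x00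

lemma shr_nonneg (m : Int) (k : Nat) (h : 0 ≤ m) : 0 ≤ m >>> k := by
  rw [Int.shiftRight_eq_div_pow]; positivity

lemma bl_shr1 (n : Int) (h : 0 < n) : PySem.Int.bitLength (n >>> (1 : Nat)) = PySem.Int.bitLength n - 1 := by
  have h1 : n >>> (1 : Nat) = PySem.Int.floordiv n 2 := by
    rw [Int.shiftRight_eq_div_pow, PySem.Int.floordiv_eq_ediv_of_pos (by norm_num)]
    norm_num
  rw [h1, PySem.Int.bitLength_of_pos h]
  omega

-- characterisation of A's while loop: it computes min 7 (exponent + bit_length temp)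
lemma loop_eq : ∀ (fuel : Nat) (t e : Int), 0 ≤ t → 1 ≤ e → e ≤ 7 → 7 ≤ e + fuel →
    alawLoopA t e fuel = min 7 (e + (PySem.Int.bitLength t : Int)) := by
  intro fuel
  induction fuel with
  | zero =>
    intro t e ht he1 he7 hf
    have he : e = 7 := by omega
    subst he
    simp only [alawLoopA]
    omega
  | succ f ih =>
    intro t e ht he1 he7 hf
    simp only [alawLoopA]
    split_ifs with h
    · have hbl : 1 ≤ PySem.Int.bitLength t := by
        rw [PySem.Int.bitLength_of_pos h.1]; omega
      rw [ih (t >>> (1 : Nat)) (e + 1) (shr_nonneg t 1 (by omega)) (by omega) (by omega) (by omega)]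
      rw [bl_shr1 t h.1]
      omega
    · push Not at h
      by_cases ht0 : 0 < t
      · have := h ht0
        omega
      · have ht' : t = 0 := by omega
        subst ht'
        simp only [PySem.Int.bitLength_zero]
        omega

lemma bl_shrk : ∀ (k : Nat) (m : Int), (2 : Int) ^ k ≤ m →
    PySem.Int.bitLength (m >>> k) = PySem.Int.bitLength m - k := by
  intro k
  induction k with
  | zero => intro m _; simp
  | succ k ih =>
    intro m hm
    have h2kpos : (0 : Int) < 2 ^ k := by positivity
    have h2k : (2 : Int) ^ k ≤ m := by
      have : (2 : Int) ^ k ≤ 2 ^ (k + 1) := by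
        rw [pow_succ]; nlinarith
      omega
    have hpos : 0 < m >>> k := by
      have hcast : (((2 : Nat) ^ k : Nat) : Int) = (2 : Int) ^ k := by push_cast; ring
      rw [Int.shiftRight_eq_div_pow, hcast]
      have h1 : (1 : Int) ≤ m / 2 ^ k := by
        rw [Int.le_ediv_iff_mul_le h2kpos, one_mul]; omega
      omega
    rw [Int.shiftRight_add m k 1, bl_shr1 _ hpos, ih m h2k]
    omega

lemma bl_ge (m : Int) (n : Nat) (h : (2 : Int) ^ n ≤ m) : n < PySem.Int.bitLength m := by
  have h1 := PySem.Int.lt_two_pow_bitLength m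
  have h2 : (2 : Nat) ^ n ≤ m.natAbs := by
    have hc : ((2 ^ n : Nat) : Int) = (2 : Int) ^ n := by push_cast; ring
    omega
  have h3 : (2 : Nat) ^ n < 2 ^ PySem.Int.bitLength m := lt_of_le_of_lt h2 h1
  exact (Nat.pow_lt_pow_iff_right (by norm_num)).mp h3

lemma bl_le (m : Int) (n : Nat) (h0 : 0 ≤ m) (h : m < (2 : Int) ^ n) : PySem.Int.bitLength m ≤ n := by
  by_cases hz : m = 0
  · subst hz; simp [PySem.Int.bitLength_zero]
  · have h1 := PySem.Int.two_pow_bitLength_le m hz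
    by_contra hc
    push Not at hc
    have hle : (2 : Nat) ^ n ≤ 2 ^ (PySem.Int.bitLength m - 1) :=
      Nat.pow_le_pow_right (by norm_num) (by omega)
    have h2 : ((2 : Nat) ^ n : Int) ≤ (m.natAbs : Int) := by exact_mod_cast le_trans hle h1
    have hcast : ((2 : Nat) ^ n : Int) = (2 : Int) ^ n := by push_cast; ring
    omega

-- the closed-form exponent equals the loop's exponent for every magnitude ≥ 16
lemma exp_eq (m : Int) (h : 16 ≤ m) :
    alawLoopA (m >>> (5 : Nat)) 1 7 = min 7 ((PySem.Int.bitLength m : Int) - 4) := by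
  by_cases h32 : m < 32
  · have hz : m >>> (5 : Nat) = 0 := by
      rw [Int.shiftRight_eq_div_pow]
      exact Int.ediv_eq_zero_of_lt (by omega) (by norm_num; omega)
    have hge : 4 < PySem.Int.bitLength m := bl_ge m 4 (by norm_num; omega)
    have hle : PySem.Int.bitLength m ≤ 5 := bl_le m 5 (by omega) (by norm_num; omega)
    rw [hz, loop_eq 7 0 1 le_rfl le_rfl (by norm_num) (by norm_num)]
    simp only [PySem.Int.bitLength_zero]
    omega
  · have hbl : PySem.Int.bitLength (m >>> (5 : Nat)) = PySem.Int.bitLength m - 5 :=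
      bl_shrk 5 m (by norm_num; omega)
    have hge : 5 < PySem.Int.bitLength m := bl_ge m 5 (by norm_num; omega)
    rw [loop_eq 7 (m >>> (5 : Nat)) 1 (shr_nonneg m 5 (by omega)) le_rfl (by norm_num) (by norm_num)]
    rw [hbl]
    omega

lemma band255 (x : Int) (h0 : 0 ≤ x) (h : x < 256) : PySem.Int.band x 255 = x := by
  rw [PySem.Int.band_of_nonneg h0 (by norm_num)]
  have h255 : (255 : Int).toNat = 255 := rfl
  rw [h255]
  have hmod := Nat.and_two_pow_sub_one_eq_mod x.toNat 8
  norm_num at hmod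
  omega

lemma mant_bounds (y : Int) (hy : 0 ≤ y) :
    0 ≤ PySem.Int.band y 15 ∧ PySem.Int.band y 15 ≤ 15 := by
  rw [PySem.Int.band_of_nonneg hy (by norm_num)]
  have h1 : y.toNat &&& (15 : Int).toNat ≤ (15 : Int).toNat := Nat.and_le_right
  constructor
  · positivity
  · exact_mod_cast h1

lemma bor_lt256 (a b : Int) (ha0 : 0 ≤ a) (hb0 : 0 ≤ b) (ha : a < 256) (hb : b < 256) :
    0 ≤ PySem.Int.bor a b ∧ PySem.Int.bor a b < 256 := by
  rw [PySem.Int.bor_of_nonneg ha0 hb0]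
  constructor
  · positivity
  · have h := Nat.or_lt_two_pow (n := 8) (x := a.toNat) (y := b.toNat) (by omega) (by omega)
    norm_num at h
    exact_mod_cast h

lemma bxor_lt256 (a b : Int) (ha0 : 0 ≤ a) (hb0 : 0 ≤ b) (ha : a < 256) (hb : b < 256) :
    0 ≤ PySem.Int.bxor a b ∧ PySem.Int.bxor a b < 256 := by
  rw [PySem.Int.bxor_of_nonneg ha0 hb0]
  constructor
  · positivity
  · have h := Nat.xor_lt_two_pow (n := 8) (x := a.toNat) (y := b.toNat) (by omega) (by omega)
    norm_num at h
    exact_mod_cast h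

-- the combined byte before A's final '& 0xFF' is already in [0, 256)
lemma val_bounds (s e mant : Int) (hs : s = 0 ∨ s = 128) (he0 : 0 ≤ e) (he : e ≤ 7)
    (hm0 : 0 ≤ mant) (hm : mant ≤ 15) :
    0 ≤ PySem.Int.bxor (PySem.Int.bor (PySem.Int.bor s (e <<< (4 : Nat))) mant) 85 ∧
    PySem.Int.bxor (PySem.Int.bor (PySem.Int.bor s (e <<< (4 : Nat))) mant) 85 < 256 := by
  have hsh : e <<< (4 : Nat) = e * 16 := by rw [Int.shiftLeft_eq]; norm_num
  have h1 := bor_lt256 s (e <<< (4 : Nat)) (by omega) (by omega) (by omega) (by omega)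
  have h2 := bor_lt256 _ mant h1.1 hm0 h1.2 (by omega)
  exact bxor_lt256 _ 85 h2.1 (by norm_num) h2.2 (by norm_num)

lemma core_eq (m s : Int) (hm : 0 ≤ m) (hs : s = 0 ∨ s = 128) : coreA m s = coreB m s := by
  unfold coreA coreB
  by_cases h16 : m < 16
  · simp only [if_pos h16]
    obtain ⟨hb0, hb1⟩ := mant_bounds (m >>> (1 : Nat)) (shr_nonneg m 1 hm)
    obtain ⟨hv0, hv1⟩ := val_bounds s 0 (PySem.Int.band (m >>> (1 : Nat)) 15) hs le_rfl (by norm_num) hb0 hb1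
    exact band255 _ hv0 hv1
  · simp only [if_neg h16]
    rw [exp_eq m (by omega)]
    set e : Int := min 7 ((PySem.Int.bitLength m : Int) - 4) with he
    have he0 : 0 ≤ e := by
      have h4 : 4 < PySem.Int.bitLength m := bl_ge m 4 (by norm_num; omega)
      omega
    have he7 : e ≤ 7 := by omega
    obtain ⟨hb0, hb1⟩ := mant_bounds (m >>> (e + 1).toNat) (shr_nonneg m _ hm)
    obtain ⟨hv0, hv1⟩ := val_bounds s e (PySem.Int.band (m >>> (e + 1).toNat) 15) hs he0 he7 hb0 hb1
    exact band255 _ hv0 hv1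

lemma clamp_eq (x : Int) :
    (if x > 4095 then (4095 : Int) else if x < -4095 then -4095 else x)
      = max (-4095) (min 4095 x) := by
  split_ifs <;> omega

lemma A_eq_core (sample : Int) :
    linear_to_alaw sample = coreA (magOf sample) (signOf sample) := by
  unfold linear_to_alaw coreA magOf signOf
  simp only [clamp_eq]

lemma B_eq_core (sample : Int) :
    linear_to_alaw_alt sample = coreB (magOf sample) (signOf sample) := by
  rfl

-- ===== VERDICT (by name: the statement is the Claim_ definition above) =====
theorem linear_to_alaw_spec : Claim_equal_linear_to_alaw := by
  intro sample _
  show linear_to_alaw sample = linear_to_alaw_alt sample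
  rw [A_eq_core, B_eq_core]
  refine core_eq _ _ ?_ ?_
  · unfold magOf; dsimp only; split_ifs <;> omega
  · unfold signOf; split_ifs <;> simp
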